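-- pv_equiv track=rewrite | github.com/daniel-reich/ubiquitous-fiesta | hzs9hZXpgYdGM3iwB_11.py | alternating_caps
-- ===== SOURCE A (Python) =====
-- def alternating_caps(txt):
--   s=list(txt.replace(" ",""))
--   for i in range(len(s)):
--     if i%2==0:
--       s[i]=s[i].upper()
--     else: s[i]=s[i].lower()
--   x=[index for index,val in enumerate(txt) if val==" "]
--   for num in x:
--     s.insert(num," ")
--   return "".join(s)
-- ===== SOURCE B (Python) =====
-- def alternating_caps(txt):
--   out = []
--   count = 0
--   for ch in txt:
--     if ch == " ":
--       out.append(ch)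
--     else:
--       out.append(ch.upper() if count % 2 == 0 else ch.lower())
--       count += 1
--   return "".join(out)
-- ===== Notes on version B (the rewrite author's own statement) =====
-- stated objective: simpler
-- what changed: A strips spaces, rewrites the stripped list by index parity, collects the space positions and re-inserts them one by one; B makes a single pass over the characters with a running non-space counter, emitting each character directly.
import Mathlib
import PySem

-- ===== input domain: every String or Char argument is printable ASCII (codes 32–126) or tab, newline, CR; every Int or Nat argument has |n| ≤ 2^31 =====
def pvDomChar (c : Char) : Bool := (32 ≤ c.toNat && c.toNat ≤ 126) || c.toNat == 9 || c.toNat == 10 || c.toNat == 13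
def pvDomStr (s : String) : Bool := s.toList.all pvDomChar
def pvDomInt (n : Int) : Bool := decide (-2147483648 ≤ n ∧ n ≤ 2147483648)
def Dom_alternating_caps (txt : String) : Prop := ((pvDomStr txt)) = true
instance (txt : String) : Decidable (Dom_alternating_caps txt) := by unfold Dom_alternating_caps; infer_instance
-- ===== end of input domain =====

-- B replaces A's strip / index-parity transform / space-position table / reinsertion pipeline
-- by a single pass with a running non-space counter (objective: simpler); same return value.

-- ===== PORT A =====
def alternating_caps (txt : String) : String :=
  let s := (PySem.Str.replace txt " " "").toList
  let s2 := (PySem.List.pyRange 0 (s.length : Int) 1).foldl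
    (fun s i => if PySem.Int.mod i 2 = 0
        then PySem.List.pySetD s i (PySem.Chars.upperChar (PySem.List.pyGetD s i ' '))
        else PySem.List.pySetD s i (PySem.Chars.lowerChar (PySem.List.pyGetD s i ' '))) s
  let x := ((PySem.List.enumerate txt.toList 0).filter (fun p => p.2 == ' ')).map (fun p => p.1)
  let s3 := x.foldl (fun s num => PySem.List.insert s num ' ') s2
  PySem.Str.join "" (s3.map (fun c => String.ofList [c]))

-- ===== PORT B =====
-- B-side helper: the single pass, carrying the count of non-space characters seen so far
def altGoB : List Char → Nat → List Char
  | [], _ => []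
  | c :: cs, k =>
    if c = ' ' then ' ' :: altGoB cs k
    else (if k % 2 = 0 then PySem.Chars.upperChar c else PySem.Chars.lowerChar c) :: altGoB cs (k + 1)

def alternating_caps_alt (txt : String) : String := String.ofList (altGoB txt.toList 0)

-- ===== PRECONDITION & SPEC =====
def Spec_alternating_caps (txt : String) (out : String) : Prop := out = alternating_caps_alt txt
instance (txt : String) (out : String) : Decidable (Spec_alternating_caps txt out) := by unfold Spec_alternating_caps; infer_instance

-- ===== CLAIM (what is proved, stated in full; the proofs are below) =====
def Claim_equal_alternating_caps : Prop := ∀ (txt : String), Dom_alternating_caps txt → Spec_alternating_caps txt (alternating_caps txt)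

-- ===== LEMMAS AND PROOFS =====

-- stage 1: txt.replace(" ", "") keeps exactly the non-space characters
lemma replace_go_filter : ∀ (fuel : Nat) (l acc : List Char), l.length ≤ fuel →
    PySem.Chars.replace.go [' '] [] fuel l acc = acc.reverse ++ l.filter (fun c => !(c == ' ')) := by
  intro fuel
  induction fuel with
  | zero => intro l acc h; simp at h; simp [h, PySem.Chars.replace.go]
  | succ n ih =>
    intro l acc h
    cases l with
    | nil => simp [PySem.Chars.replace.go]
    | cons c t =>
      by_cases hc : c = ' '
      · subst hc
        rw [PySem.Chars.replace.go]
        rw [if_pos (by simp [List.isPrefixOf])]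
        simp only [List.length_singleton, List.drop_one, List.tail_cons, List.reverse_nil,
          List.nil_append]
        rw [ih t acc (by simpa using h)]
        simp
      · rw [PySem.Chars.replace.go]
        rw [if_neg (by simp [List.isPrefixOf]; exact fun h => absurd h.symm hc)]
        rw [ih t (c :: acc) (by simpa using h)]
        simp [hc]

lemma replace_filter (txt : String) :
    (PySem.Str.replace txt " " "").toList = txt.toList.filter (fun c => !(c == ' ')) := by
  rw [PySem.Str.toList_replace]
  show PySem.Chars.replace txt.toList [' '] [] = _
  rw [PySem.Chars.replace]
  simp only [List.isEmpty_cons, Bool.false_eq_true, ite_false]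
  rw [replace_go_filter _ _ _ (le_refl _)]
  simp

-- parity-alternating transformation of a space-free list, starting at count k
def capsFrom (k : Nat) : List Char → List Char
  | [] => []
  | c :: cs =>
    (if k % 2 = 0 then PySem.Chars.upperChar c else PySem.Chars.lowerChar c) :: capsFrom (k + 1) cs

lemma set_len_append (pre cs : List Char) (c v : Char) :
    (pre ++ c :: cs).set pre.length v = pre ++ v :: cs := by
  induction pre with
  | nil => simp
  | cons p ps ih => simp [ih]

lemma getD_len_append (pre cs : List Char) (c d : Char) :
    (pre ++ c :: cs).getD pre.length d = c := by
  induction pre with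
  | nil => simp
  | cons p ps ih => simpa using ih

-- stage 2: A's index loop over the space-free list is capsFrom
lemma capsLoop : ∀ (l done : List Char),
    (PySem.List.pyRange (done.length : Int) ((done.length : Int) + (l.length : Int)) 1).foldl
      (fun s i => if PySem.Int.mod i 2 = 0
        then PySem.List.pySetD s i (PySem.Chars.upperChar (PySem.List.pyGetD s i ' '))
        else PySem.List.pySetD s i (PySem.Chars.lowerChar (PySem.List.pyGetD s i ' '))) (done ++ l)
    = done ++ capsFrom done.length l := by
  intro l
  induction l with
  | nil => intro done; simp [PySem.List.pyRange_one_eq_nil, capsFrom]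
  | cons c cs ih =>
    intro done
    rw [PySem.List.pyRange_one_cons (by push_cast [List.length_cons]; omega)]
    simp only [List.foldl_cons]
    have hget : PySem.List.pyGetD (done ++ c :: cs) (done.length : Int) ' ' = c := by
      rw [PySem.List.pyGetD_natCast, getD_len_append]
    have key : ∀ v : Char,
        PySem.List.pySetD (done ++ c :: cs) (done.length : Int) v = (done ++ [v]) ++ cs := by
      intro v; rw [PySem.List.pySetD_natCast, set_len_append]; simp
    have hcond : (PySem.Int.mod (done.length : Int) 2 = 0) ↔ done.length % 2 = 0 := by
      have : PySem.Int.mod (done.length : Int) 2 = ((done.length % 2 : Nat) : Int) := by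
        exact_mod_cast PySem.Int.mod_natCast done.length 2
      rw [this]; exact_mod_cast Iff.rfl
    set v : Char := if done.length % 2 = 0 then PySem.Chars.upperChar c
      else PySem.Chars.lowerChar c with hv
    have step : (if PySem.Int.mod (done.length : Int) 2 = 0
        then PySem.List.pySetD (done ++ c :: cs) (done.length : Int)
          (PySem.Chars.upperChar (PySem.List.pyGetD (done ++ c :: cs) (done.length : Int) ' '))
        else PySem.List.pySetD (done ++ c :: cs) (done.length : Int)
          (PySem.Chars.lowerChar (PySem.List.pyGetD (done ++ c :: cs) (done.length : Int) ' ')))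
        = (done ++ [v]) ++ cs := by
      by_cases hd : done.length % 2 = 0
      · rw [if_pos (hcond.mpr hd), hget, key, hv, if_pos hd]
      · rw [if_neg (fun hh => hd (hcond.mp hh)), hget, key, hv, if_neg hd]
    rw [step]
    have hr : PySem.List.pyRange ((done.length : Int) + 1)
        ((done.length : Int) + (((c :: cs).length : Nat) : Int)) 1
        = PySem.List.pyRange (((done ++ [v]).length : Nat) : Int)
            ((((done ++ [v]).length : Nat) : Int) + ((cs.length : Nat) : Int)) 1 := by
      congr 1 <;> simp <;> omega
    rw [hr, ih]
    have hlen : (done ++ [v]).length = done.length + 1 := by simp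
    rw [hlen]
    simp [capsFrom, hv]

-- stage 3: re-inserting the spaces at their recorded positions interleaves back into B's pass
lemma insLoop : ∀ (l : List Char) (k : Nat) (pre : List Char),
    (((PySem.List.enumerate l (pre.length : Int)).filter (fun p => p.2 == ' ')).map
        (fun p => p.1)).foldl (fun s num => PySem.List.insert s num ' ')
      (pre ++ capsFrom k (l.filter (fun c => !(c == ' '))))
    = pre ++ altGoB l k := by
  intro l
  induction l with
  | nil => intro k pre; simp [PySem.List.enumerate_nil, capsFrom, altGoB]
  | cons c cs ih =>
    intro k pre
    rw [PySem.List.enumerate_cons]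
    by_cases hc : c = ' '
    · subst hc
      simp only [List.filter_cons, beq_self_eq_true, Bool.not_true, if_true,
        Bool.false_eq_true, if_false, List.map_cons, List.foldl_cons]
      have hins : PySem.List.insert
          (pre ++ capsFrom k (cs.filter (fun c => !(c == ' ')))) ((pre.length : Nat) : Int) ' '
          = (pre ++ [' ']) ++ capsFrom k (cs.filter (fun c => !(c == ' '))) := by
        rw [PySem.List.insert_natCast _ _ _ (by simp)]
        rw [List.take_left, List.drop_left]
        simp
      rw [hins]
      simp only [List.append_assoc, List.singleton_append]
      have ihh := ih k (pre ++ [' '])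
      rw [(by simp : (((pre ++ [' ']).length : Nat) : Int) = (pre.length : Int) + 1)] at ihh
      simp only [List.append_assoc, List.singleton_append] at ihh
      rw [ihh]
      simp [altGoB]
    · have hcb : (c == ' ') = false := by simp [hc]
      simp only [List.filter_cons, hcb, Bool.not_false, Bool.false_eq_true, if_false, if_true]
      have hcaps : capsFrom k (c :: cs.filter (fun c => !(c == ' ')))
          = (if k % 2 = 0 then PySem.Chars.upperChar c else PySem.Chars.lowerChar c)
            :: capsFrom (k + 1) (cs.filter (fun c => !(c == ' '))) := by
        simp [capsFrom]
      rw [hcaps]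
      have ihh := ih (k + 1)
        (pre ++ [if k % 2 = 0 then PySem.Chars.upperChar c else PySem.Chars.lowerChar c])
      rw [(by simp : (((pre ++ [if k % 2 = 0 then PySem.Chars.upperChar c
        else PySem.Chars.lowerChar c]).length : Nat) : Int) = (pre.length : Int) + 1)] at ihh
      simp only [List.append_assoc, List.singleton_append] at ihh
      rw [ihh]
      simp [altGoB, hc]

-- "".join over singleton strings rebuilds the string
lemma join_singleton_chars (cs : List Char) :
    PySem.Str.join "" (cs.map (fun c => String.ofList [c])) = String.ofList cs := by
  apply String.toList_inj.mp
  rw [PySem.Str.toList_join]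
  simp only [List.map_map]
  have h1 : (List.map (String.toList ∘ fun c => String.ofList [c]) cs) = cs.map (fun c => [c]) := by
    simp [Function.comp_def, String.toList_ofList]
  rw [h1]
  have h0 : ("" : String).toList = ([] : List Char) := by decide
  rw [h0, PySem.Chars.join_nil_singletons, String.toList_ofList]

-- ===== VERDICT (by name: the statement is the Claim_ definition above) =====
theorem alternating_caps_spec : Claim_equal_alternating_caps := by
  intro txt _
  unfold Spec_alternating_caps alternating_caps alternating_caps_alt
  simp only [replace_filter]
  have h2 := capsLoop (txt.toList.filter (fun c => !(c == ' '))) []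
  simp only [List.nil_append, List.length_nil, Nat.cast_zero, zero_add] at h2
  rw [h2]
  have h3 := insLoop txt.toList 0 []
  simp only [List.nil_append, List.length_nil, Nat.cast_zero] at h3
  rw [h3, join_singleton_chars]
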